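-- pv_equiv track=rewrite | github.com/threat0day/review_tasks | python/brakets/multiply_chars/main.py | get_str_and_multiply
-- ===== SOURCE A (Python) =====
-- def get_str_and_multiply(source: str):
--     currentstr = ''
--     multiplicator = 1
--     for item in source:
--         if item.isdigit():
--             multiplicator = int(item)
--         elif item == '[':
--             ...
--         elif item == ']':
--             break
--         else:
--             currentstr += item
--
--     return currentstr, multiplicator
-- ===== SOURCE B (Python) =====
-- def get_str_and_multiply(source: str):
--     prefix = source.split(']', 1)[0]
--     currentstr = ''.join(c for c in prefix if not c.isdigit() and c != '[')
--     digits = [c for c in prefix if c.isdigit()]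
--     return currentstr, (int(digits[-1]) if digits else 1)
-- ===== Notes on version B (the rewrite author's own statement) =====
-- stated objective: simpler
-- what changed: Replaces the stateful character loop (break, string accumulator, overwritten multiplier) with a declarative decomposition: take the prefix before the first closing bracket, filter out digits and opening brackets for the string, and use the last digit of the prefix (default 1) as the multiplier.
import Mathlib
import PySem

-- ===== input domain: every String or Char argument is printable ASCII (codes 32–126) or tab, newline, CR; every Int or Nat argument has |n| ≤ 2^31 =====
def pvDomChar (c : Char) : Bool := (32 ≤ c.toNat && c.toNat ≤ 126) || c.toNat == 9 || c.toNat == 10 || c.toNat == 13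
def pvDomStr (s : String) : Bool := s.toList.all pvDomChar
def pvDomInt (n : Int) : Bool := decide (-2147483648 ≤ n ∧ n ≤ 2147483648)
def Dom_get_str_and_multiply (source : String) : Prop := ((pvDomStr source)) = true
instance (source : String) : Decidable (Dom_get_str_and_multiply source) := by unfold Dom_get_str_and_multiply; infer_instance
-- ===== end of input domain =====

-- B replaces A's stateful loop by a split-then-filter decomposition (objective: simpler); return values proved equal.

-- ===== PORT A =====
-- A's for-loop with early break: structural recursion over the characters carrying (currentstr, multiplicator).
-- Char.isDigit coincides with Python's str.isdigit on the printable-ASCII domain; int(item) for a digit char is toNat - 48.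
def goA : List Char → List Char → Int → List Char × Int
  | [], cur, m => (cur, m)
  | c :: rest, cur, m =>
    if c.isDigit then goA rest cur ((c.toNat : Int) - 48)
    else if c = '[' then goA rest cur m
    else if c = ']' then (cur, m)
    else goA rest (cur ++ [c]) m

def get_str_and_multiply (source : String) : String × Int :=
  let r := goA source.toList [] 1
  (String.ofList r.1, r.2)

-- ===== PORT B =====
-- Source B: prefix before the first ']', filter for the string, last digit (default 1) as multiplier.
def get_str_and_multiply_alt (source : String) : String × Int :=
  let pre := source.toList.takeWhile (fun c => c ≠ ']')
  let currentstr := pre.filter (fun c => !c.isDigit && c ≠ '[')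
  let digits := pre.filter (fun c => c.isDigit)
  (String.ofList currentstr,
    match digits.getLast? with
    | some d => (d.toNat : Int) - 48
    | none => 1)

-- ===== PRECONDITION & SPEC =====
def Spec_get_str_and_multiply (source : String) (out : String × Int) : Prop := out = get_str_and_multiply_alt source
instance (source : String) (out : String × Int) : Decidable (Spec_get_str_and_multiply source out) := by unfold Spec_get_str_and_multiply; infer_instance

-- ===== CLAIM (what is proved, stated in full; the proofs are below) =====
def Claim_equal_get_str_and_multiply : Prop := ∀ (source : String), Dom_get_str_and_multiply source → Spec_get_str_and_multiply source (get_str_and_multiply source)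

-- ===== LEMMAS AND PROOFS =====
-- Loop invariant: goA on l with accumulator (cur, m) = (cur ++ B's filtered prefix, B's multiplier with default m).
theorem goA_eq (l : List Char) : ∀ (cur : List Char) (m : Int),
    goA l cur m =
      (cur ++ (l.takeWhile (fun c => c ≠ ']')).filter (fun c => !c.isDigit && c ≠ '['),
       match ((l.takeWhile (fun c => c ≠ ']')).filter (fun c => c.isDigit)).getLast? with
       | some d => (d.toNat : Int) - 48
       | none => m) := by
  induction l with
  | nil => intro cur m; simp [goA]
  | cons c rest ih =>
    intro cur m
    by_cases hd : c.isDigit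
    · have hne : c ≠ ']' := by rintro rfl; simp at hd
      have h1 : goA (c :: rest) cur m = goA rest cur ((c.toNat : Int) - 48) := by
        simp [goA, hd]
      have h2 : (c :: rest).takeWhile (fun c => c ≠ ']') = c :: rest.takeWhile (fun c => c ≠ ']') := by
        simp [hne]
      rw [h1, ih, h2, List.filter_cons, List.filter_cons]
      rcases (rest.takeWhile (fun c => c ≠ ']')).filter (fun c => c.isDigit) |>.eq_nil_or_concat
        with hL | ⟨l', a, hL⟩ <;> rw [hL]
      · simp [hd]
      · simp only [hd, if_true, List.concat_eq_append,
          show c :: (l' ++ [a]) = (c :: l') ++ [a] from rfl, List.getLast?_concat]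
        simp
    · by_cases hb : c = '['
      · subst hb
        simp [goA, ih]
      · by_cases hr : c = ']'
        · subst hr
          simp [goA]
        · simp [goA, hd, hb, hr, ih]

-- ===== VERDICT (by name: the statement is the Claim_ definition above) =====
theorem get_str_and_multiply_spec : Claim_equal_get_str_and_multiply := by
  intro source _
  unfold Spec_get_str_and_multiply get_str_and_multiply get_str_and_multiply_alt
  simp [goA_eq]
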